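-- pv_equiv track=rewrite | github.com/arv1ndrana/python-examples | simple_sum_of_pairs.py | solve
-- ===== SOURCE A (Python) =====
-- def solve(number):
--     string_number = str(number)
--     list_number = [int(digit) for digit in string_number]
--     sum_of_digits_of_number = sum(list_number)
--
--     maximum_digit_sum = 0
--
--     for first_number in range(1,number):
--         second_number = number - first_number
--
--         first_number_list = [int(digit) for digit in str(first_number)]
--         second_number_list = [int(digit) for digit in str(second_number)]
--
--         digit_sum = sum(first_number_list) + sum(second_number_list)
--
--         if digit_sum > maximum_digit_sum:
--             maximum_digit_sum = digit_sum
--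
--     return (maximum_digit_sum)
-- ===== SOURCE B (Python) =====
-- def solve(number):
--     # Closed-form: the best split pairs the largest all-nines number below
--     # `number` with the remainder; answer = 9*k + digit_sum(number - 10**k + 1).
--     if number <= 1:
--         return 0
--     p = 1
--     k = 0
--     while p * 10 <= number:
--         p *= 10
--         k += 1
--     rest = number - p + 1
--     s = 0
--     while rest > 0:
--         s += rest % 10
--         rest //= 10
--     return 9 * k + s
-- ===== Notes on version B (the rewrite author's own statement) =====
-- stated objective: faster
-- what changed: Replaces the brute-force scan over all splits 1..number-1 (string-converting every pair) with a closed form: the maximum is attained at the all-nines split a = 10^k - 1 (largest 10^k <= number), so B just finds that power of ten and adds the digit sum of number - 10^k + 1.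
import Mathlib
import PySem

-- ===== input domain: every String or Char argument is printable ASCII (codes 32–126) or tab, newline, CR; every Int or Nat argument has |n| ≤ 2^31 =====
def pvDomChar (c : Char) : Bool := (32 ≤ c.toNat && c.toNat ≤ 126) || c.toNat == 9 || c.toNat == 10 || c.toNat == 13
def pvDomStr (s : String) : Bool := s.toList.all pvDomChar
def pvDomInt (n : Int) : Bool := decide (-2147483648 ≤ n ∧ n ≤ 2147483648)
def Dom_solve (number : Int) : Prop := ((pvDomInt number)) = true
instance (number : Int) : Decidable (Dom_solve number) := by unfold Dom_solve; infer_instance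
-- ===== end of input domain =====

-- B replaces A's O(n log n) scan of every split by the closed form 9*k + digitsum(n - 10^k + 1)
-- (largest 10^k ≤ n), proved equal to the maximum A computes.

-- ===== PORT A =====
-- int(d) for one character d, as Python's int(): exact via PySem.Int.ofChars?; the .getD 0
-- fallback is Python's ValueError, reached only for '-' of a negative number (outside Pre_solve).
def pvIntOfDigit (d : Char) : Int := (PySem.Int.ofChars? [d]).getD 0

def solve (number : Int) : Int :=
  let string_number := PySem.Int.toStr number
  let list_number := string_number.toList.map pvIntOfDigit
  let _sum_of_digits_of_number := list_number.sum   -- computed and unused, as in A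
  (PySem.List.pyRange 1 number 1).foldl (fun maximum_digit_sum first_number =>
    let second_number := number - first_number
    let first_number_list := (PySem.Int.toStr first_number).toList.map pvIntOfDigit
    let second_number_list := (PySem.Int.toStr second_number).toList.map pvIntOfDigit
    let digit_sum := first_number_list.sum + second_number_list.sum
    if digit_sum > maximum_digit_sum then digit_sum else maximum_digit_sum) 0

-- ===== PORT B =====
-- while p * 10 <= number: p *= 10; k += 1   (the fuel argument is a pure totality guard,
-- never exhausted on the calls solve_alt makes)
def pvPowLoop (number p k : Int) : Nat → Int × Int
  | 0 => (p, k)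
  | fuel + 1 => if p * 10 ≤ number then pvPowLoop number (p * 10) (k + 1) fuel else (p, k)

-- while rest > 0: s += rest % 10; rest //= 10   (fuel likewise a totality guard)
def pvDigitLoop (rest s : Int) : Nat → Int
  | 0 => s
  | fuel + 1 =>
    if 0 < rest then pvDigitLoop (PySem.Int.floordiv rest 10) (s + PySem.Int.mod rest 10) fuel
    else s

def solve_alt (number : Int) : Int :=
  if number ≤ 1 then 0
  else
    let pk := pvPowLoop number 1 0 number.toNat
    9 * pk.2 + pvDigitLoop (number - pk.1 + 1) 0 (number - pk.1 + 1).toNat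

-- ===== PRECONDITION & SPEC =====
-- Pre_solve: Python A raises ValueError on int('-') when number < 0; nonnegative inputs only.
def Pre_solve (number : Int) : Prop := 0 ≤ number
instance (number : Int) : Decidable (Pre_solve number) := by unfold Pre_solve; infer_instance
def pvWitness_solve : Int := 37

def Spec_solve (number : Int) (out : Int) : Prop := out = solve_alt number
instance (number : Int) (out : Int) : Decidable (Spec_solve number out) := by unfold Spec_solve; infer_instance

-- ===== CLAIM (what is proved, stated in full; the proofs are below) =====
def Claim_equal_solve : Prop := ∀ (number : Int), Dom_solve number → Pre_solve number → Spec_solve number (solve number)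

-- ===== LEMMAS AND PROOFS =====

-- digit sum (mathematical reference object)
def pvS (m : Nat) : Nat := (Nat.digits 10 m).sum
-- truncated sum of quotients ∑_{j=1}^{K} m / 10^j
def pvT (m K : Nat) : Nat := ∑ j ∈ Finset.range K, m / 10 ^ (j + 1)

lemma pvS_step (m : Nat) : pvS m = m % 10 + pvS (m / 10) := by
  rcases Nat.eq_zero_or_pos m with h | h
  · simp [h, pvS]
  · rw [pvS, Nat.digits_def' (by norm_num) h]; simp [pvS]

lemma pvS_lt_ten {m : Nat} (h : m < 10) : pvS m = m := by
  rw [pvS_step, Nat.mod_eq_of_lt h, Nat.div_eq_of_lt h]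
  simp [pvS]

lemma pvT_succ (m K : Nat) : pvT m (K + 1) = pvT (m / 10) K + m / 10 := by
  rw [pvT, Finset.sum_range_succ']
  congr 1
  · rw [pvT]
    apply Finset.sum_congr rfl
    intro j _
    rw [Nat.div_div_eq_div_mul, ← pow_succ']

-- m = S m + 9 * T m K  whenever m < 10^(K+1)
lemma pvST (K : Nat) : ∀ m : Nat, m < 10 ^ (K + 1) → m = pvS m + 9 * pvT m K := by
  induction K with
  | zero =>
    intro m hm
    have h0 : pvT m 0 = 0 := by simp [pvT]
    rw [pvS_lt_ten (by simpa using hm), h0]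
    ring
  | succ K ih =>
    intro m hm
    have hdiv : m / 10 < 10 ^ (K + 1) := by
      rw [Nat.div_lt_iff_lt_mul (by norm_num)]
      calc m < 10 ^ (K + 2) := hm
        _ = 10 ^ (K + 1) * 10 := by ring
    have hIH := ih (m / 10) hdiv
    have hs := pvS_step m
    have hd := Nat.div_add_mod m 10
    rw [pvT_succ]
    omega

lemma pvS_nines (K : Nat) : pvS (10 ^ K - 1) = 9 * K := by
  induction K with
  | zero => simp [pvS]
  | succ K ih =>
    have hx : 1 ≤ 10 ^ K := Nat.one_le_pow _ _ (by norm_num)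
    have h1 : 10 ^ (K + 1) - 1 = 10 * 10 ^ K - 1 := by rw [pow_succ]; ring_nf
    have h2 : (10 * 10 ^ K - 1) % 10 = 9 := by omega
    have h3 : (10 * 10 ^ K - 1) / 10 = 10 ^ K - 1 := by omega
    rw [h1, pvS_step, h2, h3, ih]
    ring

-- key floor inequality: (a + b + 1 - t) / t ≤ a / t + b / t
lemma pv_div_key (a b t : Nat) (ht : 0 < t) : (a + b + 1 - t) / t ≤ a / t + b / t := by
  have hda := Nat.div_add_mod a t
  have hdb := Nat.div_add_mod b t
  have hra : a % t < t := Nat.mod_lt _ ht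
  have hrb : b % t < t := Nat.mod_lt _ ht
  have h1 : a + b + 1 - t ≤ t * (a / t + b / t) + (t - 1) := by
    have hd : t * (a / t + b / t) = t * (a / t) + t * (b / t) := Nat.mul_add t _ _
    omega
  have h3 : (t * (a / t + b / t) + (t - 1)) / t = a / t + b / t := by
    rw [Nat.mul_add_div ht, Nat.div_eq_of_lt (show t - 1 < t by omega), Nat.add_zero]
  calc (a + b + 1 - t) / t ≤ (t * (a / t + b / t) + (t - 1)) / t := Nat.div_le_div_right (c := t) h1
    _ = a / t + b / t := h3

-- the all-nines split attains the floor bound exactly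
lemma pv_div_cand (P r t : Nat) (ht : 0 < t) (hdvd : t ∣ P) (htP : t ≤ P) :
    (P - 1) / t + (r + 1) / t = (P + r + 1 - t) / t := by
  obtain ⟨c, hc⟩ := hdvd
  have hc1 : 1 ≤ c := by nlinarith
  have h1 : P - 1 = t * (c - 1) + (t - 1) := by rw [hc]; rw [Nat.mul_sub]; omega
  have h2 : P + r + 1 - t = t * (c - 1) + (r + 1) := by rw [hc]; rw [Nat.mul_sub]; omega
  rw [h1, h2, Nat.mul_add_div ht, Nat.mul_add_div ht, Nat.div_eq_of_lt (by omega)]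
  ring

lemma pvT_le (K a b r : Nat) (hab : a + b = 10 ^ K + r) :
    pvT (10 ^ K - 1) K + pvT (r + 1) K ≤ pvT a K + pvT b K := by
  rw [pvT, pvT, pvT, pvT, ← Finset.sum_add_distrib, ← Finset.sum_add_distrib]
  apply Finset.sum_le_sum
  intro j hj
  have hj' : j + 1 ≤ K := Finset.mem_range.mp hj
  have ht : 0 < 10 ^ (j + 1) := Nat.pow_pos (by norm_num)
  have hdvd : 10 ^ (j + 1) ∣ 10 ^ K := pow_dvd_pow _ hj'
  have htP : 10 ^ (j + 1) ≤ 10 ^ K := Nat.pow_le_pow_right (by norm_num) hj'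
  rw [pv_div_cand _ r _ ht hdvd htP, ← hab]
  exact pv_div_key a b _ ht

-- main bound: every split of n = 10^K + r has digit sum ≤ 9K + S (r+1)
lemma pv_bound (K a b r : Nat) (hr : r < 9 * 10 ^ K) (hab : a + b = 10 ^ K + r) :
    pvS a + pvS b ≤ 9 * K + pvS (r + 1) := by
  have hP : 1 ≤ 10 ^ K := Nat.one_le_pow _ _ (by norm_num)
  have hn : 10 ^ K + r < 10 ^ (K + 1) := by rw [pow_succ]; omega
  have ha := pvST K a (by omega)
  have hb := pvST K b (by omega)
  have hm := pvST K (10 ^ K - 1) (by omega)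
  have hrr := pvST K (r + 1) (by omega)
  have hT := pvT_le K a b r hab
  have h9 := pvS_nines K
  omega

-- ---- bridge for A: digit characters of str(n) sum to pvS n ----

lemma pv_toDigitsCore (f : Nat) : ∀ (n : Nat) (acc : List Char), 0 < n → n < f →
    Nat.toDigitsCore 10 f n acc = ((Nat.digits 10 n).map Nat.digitChar).reverse ++ acc := by
  induction f with
  | zero => intro n acc h1 h2; omega
  | succ f ih =>
    intro n acc h1 h2
    rw [Nat.toDigitsCore]
    rw [Nat.digits_def' (by norm_num) h1]
    by_cases h : n / 10 = 0
    · simp [h]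
    · rw [if_neg h, ih (n / 10) _ (Nat.pos_of_ne_zero h) (by omega)]
      simp

lemma pv_digitVal {d : Nat} (h : d < 10) : pvIntOfDigit (Nat.digitChar d) = d := by
  interval_cases d <;> decide

lemma pv_sum_digits (a : Int) (ha : 0 ≤ a) :
    ((PySem.Int.toStr a).toList.map pvIntOfDigit).sum = (pvS a.toNat : Int) := by
  rw [PySem.Int.toList_toStr, PySem.Int.toChars, if_neg (by omega)]
  rcases Nat.eq_zero_or_pos a.toNat with h | h
  · rw [h]; decide
  · rw [Nat.toDigits, pv_toDigitsCore _ _ _ h (by omega)]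
    rw [List.append_nil, ← List.map_reverse, List.map_map]
    have hmem : ∀ x ∈ (Nat.digits 10 a.toNat).reverse, x < 10 := fun x hx =>
      Nat.digits_lt_base (by norm_num) (List.mem_reverse.mp hx)
    have hgen : ∀ l : List Nat, (∀ x ∈ l, x < 10) →
        (List.map (pvIntOfDigit ∘ Nat.digitChar) l).sum = (l.sum : Int) := by
      intro l
      induction l with
      | nil => simp
      | cons x xs ihl =>
        intro hm
        simp only [List.map_cons, List.sum_cons, Function.comp_apply]
        rw [pv_digitVal (hm x (by simp)), ihl (fun y hy => hm y (by simp [hy]))]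
        push_cast
        ring
    rw [hgen _ hmem, List.sum_reverse]
    rfl

-- ---- bridge for B ----

lemma pv_digitLoop (fuel : Nat) : ∀ (m : Nat) (s : Int), m ≤ fuel →
    pvDigitLoop (m : Int) s fuel = s + (pvS m : Int) := by
  induction fuel with
  | zero =>
    intro m s hm
    have h0 : m = 0 := by omega
    subst h0
    simp [pvDigitLoop, pvS]
  | succ fuel ih =>
    intro m s hm
    rw [pvDigitLoop]
    by_cases h : 0 < m
    · rw [if_pos (by exact_mod_cast h)]
      have h10 : ((10 : Nat) : Int) = (10 : Int) := by norm_num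
      rw [← h10, PySem.Int.floordiv_natCast, PySem.Int.mod_natCast]
      have hlt : m / 10 < m := Nat.div_lt_self h (by norm_num)
      rw [ih (m / 10) _ (by omega)]
      rw [pvS_step m]
      push_cast
      ring
    · rw [if_neg (by omega)]
      have h0 : m = 0 := by omega
      simp [h0, pvS]

lemma pv_powLoop (number : Int) : ∀ (fuel : Nat) (p k : Int), 0 < p → p ≤ number →
    number < p * 10 ^ fuel →
    ∃ j : Nat, pvPowLoop number p k fuel = (p * 10 ^ j, k + j) ∧
      p * 10 ^ j ≤ number ∧ number < p * 10 ^ (j + 1) := by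
  intro fuel
  induction fuel with
  | zero =>
    intro p k hp hpn hfuel
    rw [pow_zero, mul_one] at hfuel
    omega
  | succ fuel ih =>
    intro p k hp hpn hfuel
    rw [pvPowLoop]
    by_cases h : p * 10 ≤ number
    · obtain ⟨j, hj1, hj2, hj3⟩ := ih (p * 10) (k + 1) (by positivity) h
        (by calc number < p * 10 ^ (fuel + 1) := hfuel
              _ = p * 10 * 10 ^ fuel := by ring)
      refine ⟨j + 1, ?_, ?_, ?_⟩
      · rw [if_pos h, hj1]
        simp only [Prod.mk.injEq]
        constructor
        · ring
        · push_cast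
          ring
      · calc p * 10 ^ (j + 1) = p * 10 * 10 ^ j := by ring
          _ ≤ number := hj2
      · calc number < p * 10 * 10 ^ (j + 1) := hj3
          _ = p * 10 ^ (j + 2) := by ring
    · refine ⟨0, by rw [if_neg h]; simp, by simpa using hpn, by simpa using not_le.mp h⟩

-- ---- fold-max characterisation of A's loop ----

lemma pv_fold_ge_init (g : Int → Int) : ∀ (l : List Int) (init : Int),
    init ≤ l.foldl (fun m a => if g a > m then g a else m) init := by
  intro l
  induction l with
  | nil => intro init; simp
  | cons x xs ih =>
    intro init
    refine le_trans ?_ (ih _)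
    dsimp only
    split <;> omega

lemma pv_fold_ge_mem (g : Int → Int) : ∀ (l : List Int) (init a : Int), a ∈ l →
    g a ≤ l.foldl (fun m a => if g a > m then g a else m) init := by
  intro l
  induction l with
  | nil => intro init a ha; simp at ha
  | cons x xs ih =>
    intro init a ha
    rcases List.mem_cons.mp ha with h | h
    · subst h
      refine le_trans ?_ (pv_fold_ge_init g xs _)
      dsimp only
      split <;> omega
    · exact ih _ a h

lemma pv_fold_le (g : Int → Int) (B : Int) : ∀ (l : List Int) (init : Int), init ≤ B →
    (∀ a ∈ l, g a ≤ B) → l.foldl (fun m a => if g a > m then g a else m) init ≤ B := by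
  intro l
  induction l with
  | nil => intro init h _; simpa using h
  | cons x xs ih =>
    intro init h hall
    refine ih _ ?_ (fun a ha => hall a (by simp [ha]))
    dsimp only
    have := hall x (by simp)
    split <;> omega

-- ===== VERDICT (by name: the statement is the Claim_ definition above) =====
theorem solve_spec : Claim_equal_solve := by
  intro number _ hpre
  unfold Pre_solve at hpre
  unfold Spec_solve solve solve_alt
  by_cases h1 : number ≤ 1
  · rw [if_pos h1, PySem.List.pyRange_one_eq_nil (by omega)]
    rfl
  · rw [if_neg h1]
    have hfuel : number < 1 * 10 ^ number.toNat := by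
      have hN10 : number.toNat < 10 ^ number.toNat := Nat.lt_pow_self (by norm_num)
      have hcast : ((10 ^ number.toNat : Nat) : Int) = (10 : Int) ^ number.toNat := by push_cast; ring
      omega
    obtain ⟨j, hpk, hle, hlt⟩ := pv_powLoop number number.toNat 1 0 one_pos (by omega) hfuel
    rw [one_mul] at hle hlt
    rw [hpk]
    set N := number.toNat with hNdef
    have hN : (N : Int) = number := Int.toNat_of_nonneg (by omega)
    have hPle : ((10 ^ j : Nat) : Int) ≤ number := by push_cast; exact hle
    have hPlt : number < ((10 ^ (j + 1) : Nat) : Int) := by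
      push_cast
      exact hlt
    have hP1 : 1 ≤ (10 : Nat) ^ j := Nat.one_le_pow _ _ (by norm_num)
    set r : Nat := N - 10 ^ j with hrdef
    have hNr : N = 10 ^ j + r := by omega
    have hr9 : r < 9 * 10 ^ j := by
      have hp : (10 : Nat) ^ (j + 1) = 10 * 10 ^ j := by ring
      omega
    have hRval : pvDigitLoop (number - 1 * 10 ^ j + 1) 0 (number - 1 * 10 ^ j + 1).toNat
        = ((pvS (r + 1) : Nat) : Int) := by
      have hpow : (10 : Int) ^ j = ((10 ^ j : Nat) : Int) := by push_cast; ring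
      have hcast : number - 1 * 10 ^ j + 1 = ((r + 1 : Nat) : Int) := by rw [one_mul, hpow]; omega
      rw [hcast, Int.toNat_natCast, pv_digitLoop (r + 1) (r + 1) 0 (le_refl _)]
      simp
    have hBside : (let pk := ((1 * 10 ^ j : Int), (0 + (j : Int)));
        9 * pk.2 + pvDigitLoop (number - pk.1 + 1) 0 (number - pk.1 + 1).toNat)
        = 9 * (j : Int) + ((pvS (r + 1) : Nat) : Int) := by
      dsimp only
      rw [hRval]
      ring
    rw [hBside]
    set g : Int → Int := fun a =>
      ((PySem.Int.toStr a).toList.map pvIntOfDigit).sum +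
      ((PySem.Int.toStr (number - a)).toList.map pvIntOfDigit).sum with hg
    have hgval : ∀ a : Int, 1 ≤ a → a < number →
        g a = ((pvS a.toNat : Nat) : Int) + ((pvS (number - a).toNat : Nat) : Int) := by
      intro a ha1 ha2
      simp only [hg]
      rw [pv_sum_digits a (by omega), pv_sum_digits (number - a) (by omega)]
    have hbound : ∀ a ∈ PySem.List.pyRange 1 number 1,
        g a ≤ 9 * (j : Int) + ((pvS (r + 1) : Nat) : Int) := by
      intro a ha
      obtain ⟨ha1, ha2⟩ := (PySem.List.mem_pyRange_one).mp ha
      rw [hgval a ha1 ha2]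
      have hsum : a.toNat + (number - a).toNat = 10 ^ j + r := by omega
      have hb := pv_bound j a.toNat (number - a).toNat r hr9 hsum
      omega
    -- the split that attains the maximum
    have hattain : ∃ a₀ ∈ PySem.List.pyRange 1 number 1,
        g a₀ = 9 * (j : Int) + ((pvS (r + 1) : Nat) : Int) := by
      by_cases hj : j = 0
      · subst hj
        refine ⟨1, PySem.List.mem_pyRange_one.mpr ⟨le_refl 1, by omega⟩, ?_⟩
        rw [hgval 1 (le_refl 1) (by omega)]
        have e1 : (1 : Int).toNat = 1 := rfl
        have e2 : (number - 1).toNat = N - 1 := by omega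
        have hNlt : N < 10 := by
          have : (10 : Nat) ^ (0 + 1) = 10 := by norm_num
          omega
        rw [e1, e2, pvS_lt_ten (by norm_num), pvS_lt_ten (by omega), pvS_lt_ten (by omega)]
        omega
      · have h10 : (10 : Nat) ^ 1 ≤ 10 ^ j := Nat.pow_le_pow_right (by norm_num) (by omega)
        refine ⟨((10 ^ j : Nat) : Int) - 1, PySem.List.mem_pyRange_one.mpr ⟨by omega, by omega⟩, ?_⟩
        rw [hgval _ (by omega) (by omega)]
        have e1 : (((10 ^ j : Nat) : Int) - 1).toNat = 10 ^ j - 1 := by omega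
        have e2 : (number - (((10 ^ j : Nat) : Int) - 1)).toNat = r + 1 := by omega
        rw [e1, e2, pvS_nines]
        push_cast
        ring
    obtain ⟨a₀, hmem0, hga0⟩ := hattain
    refine le_antisymm (pv_fold_le g _ _ 0 (by positivity) hbound) ?_
    calc 9 * (j : Int) + ((pvS (r + 1) : Nat) : Int) = g a₀ := hga0.symm
      _ ≤ _ := pv_fold_ge_mem g _ 0 a₀ hmem0
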